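-- pv_equiv track=rewrite | github.com/diewland/codejam2018 | 1_universe/play.py | calc_dmg
-- ===== SOURCE A (Python) =====
-- def calc_dmg(p):
--     dmg = 0
--     beam = 1
--     for c in p:
--         if c == 'C':
--             beam *= 2
--         else: # S
--             dmg += beam
--     return dmg
-- ===== SOURCE B (Python) =====
-- def calc_dmg(p):
--     dmg = 0
--     for c in reversed(p):
--         if c == 'C':
--             dmg *= 2
--         else:
--             dmg += 1
--     return dmg
-- ===== Notes on version B (the rewrite author's own statement) =====
-- stated objective: alternative
-- what changed: Replaces the forward two-accumulator scan (damage plus a doubling beam strength) with a reverse single-accumulator scan where a 'C' doubles the damage accumulated so far and any other character adds 1.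
import Mathlib
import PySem

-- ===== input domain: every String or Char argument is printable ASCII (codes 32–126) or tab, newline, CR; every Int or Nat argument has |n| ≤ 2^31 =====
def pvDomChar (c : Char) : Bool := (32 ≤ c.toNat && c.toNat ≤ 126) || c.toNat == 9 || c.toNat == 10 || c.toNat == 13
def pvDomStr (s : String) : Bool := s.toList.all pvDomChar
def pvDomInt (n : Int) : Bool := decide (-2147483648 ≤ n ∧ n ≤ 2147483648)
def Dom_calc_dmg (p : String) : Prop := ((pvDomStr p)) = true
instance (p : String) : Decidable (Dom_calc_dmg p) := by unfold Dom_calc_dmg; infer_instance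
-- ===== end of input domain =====

-- B replaces A's forward scan with two accumulators (dmg, beam) by a reverse scan with one
-- accumulator; same cost, different decomposition (objective: alternative).

-- ===== PORT A =====
-- forward loop over the characters, state (dmg, beam)
def calc_dmg (p : String) : Int :=
  (p.toList.foldl
    (fun (st : Int × Int) c =>
      if c = 'C' then (st.1, st.2 * 2) else (st.1 + st.2, st.2))
    (0, 1)).1

-- ===== PORT B =====
-- loop over reversed(p), single accumulator dmg
def calc_dmg_alt (p : String) : Int :=
  p.toList.reverse.foldl
    (fun (dmg : Int) c => if c = 'C' then dmg * 2 else dmg + 1) 0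

-- ===== PRECONDITION & SPEC =====
def Spec_calc_dmg (p : String) (out : Int) : Prop := out = calc_dmg_alt p
instance (p : String) (out : Int) : Decidable (Spec_calc_dmg p out) := by unfold Spec_calc_dmg; infer_instance

-- ===== CLAIM (what is proved, stated in full; the proofs are below) =====
def Claim_equal_calc_dmg : Prop := ∀ (p : String), Dom_calc_dmg p → Spec_calc_dmg p (calc_dmg p)

-- ===== LEMMAS AND PROOFS =====

-- A's forward fold from any state equals dmg + beam * (B's reverse fold), by induction on the list.
theorem calc_dmg_foldl_eq (l : List Char) (dmg beam : Int) :
    (l.foldl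
      (fun (st : Int × Int) c =>
        if c = 'C' then (st.1, st.2 * 2) else (st.1 + st.2, st.2))
      (dmg, beam)).1
    = dmg + beam * l.foldr (fun c d => if c = 'C' then d * 2 else d + 1) 0 := by
  induction l generalizing dmg beam with
  | nil => simp
  | cons c t ih =>
    by_cases h : c = 'C' <;> simp [h, ih] <;> ring

-- ===== VERDICT (by name: the statement is the Claim_ definition above) =====
theorem calc_dmg_spec : Claim_equal_calc_dmg := by
  intro p _
  unfold Spec_calc_dmg calc_dmg calc_dmg_alt
  rw [List.foldl_reverse]
  have := calc_dmg_foldl_eq p.toList 0 1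
  simpa using this
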